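-- pv_equiv track=rewrite | github.com/nvluong/leetcode_algorithm | leetcode/tech_contest/tinhocTre/deHSG_THCS_HANOI/bai2.py | check
-- ===== SOURCE A (Python) =====
-- def check(a, n):
--     s = 0
--     max_tmp = 0
--     li = []
--     for i in range(n):
--         for j in range(n):
--             if a[j][i] == 'X':
--                 s += 1
--         if max_tmp < s:
--             max_tmp = s
--             li.clear()
--             li.append(i+1)
--         elif max_tmp == s:
--             li.append(i+1)
--         s = 0
--     len_tmp = len(li)
--
--     return len_tmp, max_tmp, li
-- ===== SOURCE B (Python) =====
-- def check(a, n):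
--     cnt = [0] * n
--     for row in a[:n]:
--         cnt = [c + (1 if row[i] == 'X' else 0) for i, c in enumerate(cnt)]
--     order = sorted(enumerate(cnt), key=lambda p: (-p[1], p[0]))
--     if not order:
--         return 0, 0, []
--     m = order[0][1]
--     li = [i + 1 for i, c in order if c == m]
--     return len(li), m, li
-- ===== Notes on version B (the rewrite author's own statement) =====
-- stated objective: alternative
-- what changed: A scans column-major with an inline running-max/clear/append state machine; B traverses the grid row-major, incrementally rebuilding a per-column count table, and then selects the answer by sorting (column, count) pairs on the key (-count, column) and taking the leading run of the sorted order.
import Mathlib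
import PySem

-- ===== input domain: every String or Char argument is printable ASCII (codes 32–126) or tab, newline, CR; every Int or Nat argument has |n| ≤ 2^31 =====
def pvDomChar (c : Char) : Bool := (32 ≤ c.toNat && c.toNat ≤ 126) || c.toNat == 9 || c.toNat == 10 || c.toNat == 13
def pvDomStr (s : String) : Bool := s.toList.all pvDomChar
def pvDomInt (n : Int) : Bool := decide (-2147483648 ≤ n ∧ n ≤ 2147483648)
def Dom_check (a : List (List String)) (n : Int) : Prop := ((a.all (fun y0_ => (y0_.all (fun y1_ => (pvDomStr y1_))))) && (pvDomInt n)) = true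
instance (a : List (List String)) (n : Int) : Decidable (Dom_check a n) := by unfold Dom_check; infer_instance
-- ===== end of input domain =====

-- B replaces A's column-major scan with inline running-max bookkeeping by a row-major
-- incremental count table followed by a sort on the key (-count, column) whose leading
-- run is the answer; objective: alternative (same O(n^2) counting, selection by sorting).

-- ===== PORT A =====
def check (a : List (List String)) (n : Int) : Int × Int × List Int :=
  let st := (PySem.List.pyRange 0 n).foldl (fun (st : Int × List Int) i =>
    let s := (PySem.List.pyRange 0 n).foldl (fun s j =>
      if PySem.List.pyGetD (PySem.List.pyGetD a j []) i "" == "X" then s + 1 else s) 0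
    if st.1 < s then (s, [i + 1])
    else if st.1 = s then (st.1, st.2 ++ [i + 1])
    else st) ((0 : Int), ([] : List Int))
  ((st.2.length : Int), st.1, st.2)

-- ===== PORT B =====
def check_alt (a : List (List String)) (n : Int) : Int × Int × List Int :=
  -- cnt = [0] * n; for row in a[:n]: cnt = [c + (1 if row[i]=='X' else 0) for i, c in enumerate(cnt)]
  let cnt0 : List Int := List.replicate n.toNat 0
  let cnt := (PySem.List.slice a none (some n)).foldl
    (fun cnt row => (PySem.List.enumerate cnt).map
      (fun p => p.2 + (if PySem.List.pyGetD row p.1 "" == "X" then (1 : Int) else 0))) cnt0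
  -- order = sorted(enumerate(cnt), key=lambda p: (-p[1], p[0])); toLex is exactly Python's tuple comparison on (Int, Int)
  let order := PySem.List.sorted (PySem.List.enumerate cnt) (fun p => toLex (-p.2, p.1))
  match order with
  | [] => (0, 0, [])
  | o :: _ =>
    let m := o.2
    let li := order.filterMap (fun p => if p.2 = m then some (p.1 + 1) else none)
    ((li.length : Int), m, li)

-- ===== PRECONDITION & SPEC =====
-- Pre_check: exactly the inputs on which A returns (a[j][i] never raises IndexError):
-- the first n rows exist and each of them has at least n columns.
def Pre_check (a : List (List String)) (n : Int) : Prop :=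
  n ≤ (a.length : Int) ∧ ∀ row ∈ a.take n.toNat, n ≤ (row.length : Int)
instance (a : List (List String)) (n : Int) : Decidable (Pre_check a n) := by unfold Pre_check; infer_instance

def pvWitness_check : List (List String) × Int := ([["X", "."], [".", "X"]], 2)

def Spec_check (a : List (List String)) (n : Int) (out : Int × Int × List Int) : Prop := out = check_alt a n
instance (a : List (List String)) (n : Int) (out : Int × Int × List Int) : Decidable (Spec_check a n out) := by unfold Spec_check; infer_instance

-- ===== CLAIM (what is proved, stated in full; the proofs are below) =====
def Claim_equal_check : Prop := ∀ (a : List (List String)) (n : Int), Dom_check a n → Pre_check a n → Spec_check a n (check a n)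

-- ===== LEMMAS AND PROOFS =====

-- the 'X'-indicator of cell (j, i) read the way A reads it
def cellInd (a : List (List String)) (i j : Int) : Int :=
  if PySem.List.pyGetD (PySem.List.pyGetD a j []) i "" == "X" then 1 else 0

-- A's column score: number of 'X' in column i among the first n rows (A-side reading)
def colSum (a : List (List String)) (n i : Int) : Int :=
  ((PySem.List.pyRange 0 n).map (fun j => cellInd a i j)).sum

theorem colSum_nonneg (a : List (List String)) (n i : Int) : 0 ≤ colSum a n i := by
  unfold colSum cellInd
  rw [PySem.List.sum_map_ite_one_zero]
  positivity

-- A's inner loop computes colSum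
theorem inner_eq (a : List (List String)) (n i : Int) :
    (PySem.List.pyRange 0 n).foldl (fun s j =>
      if PySem.List.pyGetD (PySem.List.pyGetD a j []) i "" == "X" then s + 1 else s) 0
    = colSum a n i := by
  unfold colSum cellInd
  rw [PySem.List.foldl_count_if, PySem.List.sum_map_ite_one_zero]
  simp

-- A's running-max/clear/append loop, for an arbitrary nonnegative column score g,
-- computes the max of g over the list (floored at 0) and the argmax positions (+1).
theorem loop_inv (g : Int → Int) (R : List Int) :
    R.foldl (fun (st : Int × List Int) i =>
      if st.1 < g i then (g i, [i + 1])
      else if st.1 = g i then (st.1, st.2 ++ [i + 1])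
      else st) ((0 : Int), ([] : List Int))
    = ((R.map g).foldl max 0,
       (R.filter (fun i => g i = (R.map g).foldl max 0)).map (· + 1)) := by
  induction R using List.reverseRecOn with
  | nil => simp
  | append_singleton R x ih =>
    have hMn : ((R ++ [x]).map g).foldl max 0 = max ((R.map g).foldl max 0) (g x) := by
      simp [List.foldl_append]
    have hle : ∀ i ∈ R, g i ≤ (R.map g).foldl max 0 := by
      intro i hi
      exact (PySem.List.le_foldl_max (R.map g) 0).2 (g i) (List.mem_map_of_mem hi)
    rw [List.foldl_append, ih]
    rcases lt_trichotomy ((R.map g).foldl max 0) (g x) with h | h | h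
    · have hmax : max ((R.map g).foldl max 0) (g x) = g x := max_eq_right h.le
      have hfilR : R.filter (fun i => decide (g i = g x)) = [] := by
        rw [List.filter_eq_nil_iff]
        intro i hi
        simp only [decide_eq_true_eq]
        exact fun he => absurd (he ▸ hle i hi) (not_le.mpr h)
      simp only [List.foldl_cons, List.foldl_nil, if_pos h, hMn, hmax,
        List.filter_append, hfilR]
      simp
    · simp [← h, List.filter_append]
    · have hmax : max ((R.map g).foldl max 0) (g x) = (R.map g).foldl max 0 := max_eq_left h.le
      simp only [List.foldl_cons, List.foldl_nil, hMn, hmax, List.filter_append]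
      rw [if_neg (not_lt.mpr h.le), if_neg (ne_of_gt h)]
      simp [ne_of_lt h]

theorem pyRange_len (n : Int) : (PySem.List.pyRange 0 n).length = n.toNat := by
  by_cases h : n ≤ 0
  · rw [PySem.List.pyRange_one_eq_nil h]; simp; omega
  · obtain ⟨m, rfl⟩ := Int.eq_ofNat_of_zero_le (by omega : (0:Int) ≤ n)
    rw [PySem.List.pyRange_zero_natCast]; simp

theorem pyRange_toNat (n : Int) : PySem.List.pyRange 0 ((n.toNat : Nat) : Int) = PySem.List.pyRange 0 n := by
  by_cases h : n ≤ 0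
  · rw [PySem.List.pyRange_one_eq_nil h, PySem.List.pyRange_one_eq_nil (by omega)]
  · congr 1; omega

-- one row-step of B's counting loop, on a table that is a map over pyRange
theorem step_eq (n : Int) (g : Int → Int) (row : List String) :
    (PySem.List.enumerate ((PySem.List.pyRange 0 n).map g)).map
      (fun p => p.2 + (if PySem.List.pyGetD row p.1 "" == "X" then (1 : Int) else 0))
    = (PySem.List.pyRange 0 n).map
        (fun i => g i + (if PySem.List.pyGetD row i "" == "X" then (1 : Int) else 0)) := by
  rw [PySem.List.enumerate_eq_map_pyRange _ 0]
  have hlen : PySem.List.len ((PySem.List.pyRange 0 n).map g) = ((n.toNat : Nat) : Int) := by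
    simp [PySem.List.len]
  rw [hlen, List.map_map]
  conv_rhs => rw [← pyRange_toNat]
  apply List.map_congr_left
  intro j hj
  rw [PySem.List.mem_pyRange_one] at hj
  obtain ⟨k, rfl⟩ := Int.eq_ofNat_of_zero_le hj.1
  have hkn : (k : Int) < n := by omega
  simp [PySem.List.pyGetD, hkn]

-- B's counting loop over any row list, from a table that is a map over pyRange
theorem fold_cnt (n : Int) (rows : List (List String)) (g : Int → Int) :
    rows.foldl (fun cnt row => (PySem.List.enumerate cnt).map
      (fun p => p.2 + (if PySem.List.pyGetD row p.1 "" == "X" then (1 : Int) else 0)))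
      ((PySem.List.pyRange 0 n).map g)
    = (PySem.List.pyRange 0 n).map
        (fun i => g i + (rows.map (fun row => if PySem.List.pyGetD row i "" == "X" then (1 : Int) else 0)).sum) := by
  induction rows generalizing g with
  | nil => simp
  | cons row rows ih =>
    rw [List.foldl_cons, step_eq n g row, ih]
    apply List.map_congr_left
    intro i _
    simp [add_assoc]

-- under Pre, the first n rows read positionally are the first n rows read by index
theorem take_eq_map_pyRange (a : List (List String)) (n : Int) (hlen : n ≤ (a.length : Int)) :
    a.take n.toNat = (PySem.List.pyRange 0 n).map (fun j => PySem.List.pyGetD a j []) := by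
  rw [← pyRange_toNat, PySem.List.pyRange_zero_natCast, List.map_map]
  apply List.ext_getElem
  · simp; omega
  · intro k h1 h2
    simp only [List.getElem_take, List.getElem_map, List.getElem_range, Function.comp_apply]
    rw [PySem.List.pyGetD_eq_getElem a [] (by positivity) (by simp at h2 ⊢; omega)]
    simp

theorem enumerate_map_pyRange (n : Int) (g : Int → Int) :
    PySem.List.enumerate ((PySem.List.pyRange 0 n).map g)
    = (PySem.List.pyRange 0 n).map (fun i => (i, g i)) := by
  rw [PySem.List.enumerate_eq_map_pyRange _ 0]
  have hlen : PySem.List.len ((PySem.List.pyRange 0 n).map g) = ((n.toNat : Nat) : Int) := by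
    simp [PySem.List.len]
  rw [hlen, pyRange_toNat]
  apply List.map_congr_left
  intro j hj
  rw [PySem.List.mem_pyRange_one] at hj
  obtain ⟨k, rfl⟩ := Int.eq_ofNat_of_zero_le hj.1
  have hkn : (k : Int) < n := hj.2
  have hk : k < n.toNat := by omega
  simp [PySem.List.pyGetD, hkn]

theorem pairwise_lt_pyRange (n : Int) :
    (PySem.List.pyRange 0 n).Pairwise (· < ·) := by
  rw [← pyRange_toNat, PySem.List.pyRange_zero_natCast]
  exact List.Pairwise.map _ (fun {a b} (h : a < b) => by exact_mod_cast h) List.pairwise_lt_range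

theorem filterMap_if_plus_one (m : Int) (R : List (Int × Int)) :
    R.filterMap (fun p => if p.2 = m then some (p.1 + 1) else none)
    = (R.filter (fun p => p.2 = m)).map (fun p => p.1 + 1) := by
  induction R with
  | nil => rfl
  | cons x t ih =>
    by_cases h : x.2 = m <;> simp [h, ih]

theorem key_inj : Function.Injective (fun p : Int × Int => toLex (-p.2, p.1)) := by
  intro p q h
  have h' : ((-p.2, p.1) : Int × Int) = (-q.2, q.1) := congrArg ofLex h
  have h1 := congrArg Prod.fst h'
  have h2 := congrArg Prod.snd h'
  simp only at h1 h2
  exact Prod.ext h2 (by omega)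

theorem check_eq_alt (a : List (List String)) (n : Int) (hpre : Pre_check a n) :
    check a n = check_alt a n := by
  obtain ⟨hlen, -⟩ := hpre
  simp only [check, check_alt]
  have hstep : (fun (st : Int × List Int) i =>
      let s := (PySem.List.pyRange 0 n).foldl (fun s j =>
        if PySem.List.pyGetD (PySem.List.pyGetD a j []) i "" == "X" then s + 1 else s) 0
      if st.1 < s then (s, [i + 1])
      else if st.1 = s then (st.1, st.2 ++ [i + 1])
      else st)
      = (fun (st : Int × List Int) i =>
      if st.1 < colSum a n i then (colSum a n i, [i + 1])
      else if st.1 = colSum a n i then (st.1, st.2 ++ [i + 1])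
      else st) := by
    funext st i
    simp only [inner_eq]
  rw [hstep, loop_inv (colSum a n) (PySem.List.pyRange 0 n)]
  have hcnt0 : (List.replicate n.toNat (0:Int)) = (PySem.List.pyRange 0 n).map (fun _ => (0:Int)) := by
    rw [List.map_const', pyRange_len]
  rw [hcnt0, fold_cnt]
  by_cases hn : n ≤ 0
  · rw [PySem.List.pyRange_one_eq_nil hn]
    simp [PySem.List.sorted]
  · -- 0 < n
    have hn0 : (0:Int) ≤ n := by omega
    have hslice : PySem.List.slice a none (some n) = a.take n.toNat :=
      PySem.List.slice_to a hn0
    have hcnt : (PySem.List.pyRange 0 n).map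
        (fun i => (0:Int) + ((PySem.List.slice a none (some n)).map
          (fun row => if PySem.List.pyGetD row i "" == "X" then (1 : Int) else 0)).sum)
        = (PySem.List.pyRange 0 n).map (colSum a n) := by
      apply List.map_congr_left
      intro i _
      rw [hslice, take_eq_map_pyRange a n hlen, List.map_map, zero_add]
      rfl
    rw [hcnt, enumerate_map_pyRange]
    set M := ((PySem.List.pyRange 0 n).map (colSum a n)).foldl max 0 with hM
    set E := (PySem.List.pyRange 0 n).map (fun i => (i, colSum a n i)) with hE
    set ord := PySem.List.sorted E (fun p => toLex (-p.2, p.1)) with hord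
    have hperm : ord.Perm E := PySem.List.sorted_perm E _ false
    have hpairs : ord.Pairwise (fun p q => toLex (-p.2, p.1) ≤ toLex (-q.2, q.1)) :=
      PySem.List.sorted_pairwise E _
    have hEne : E ≠ [] := by
      simp only [hE, ne_eq, List.map_eq_nil_iff]
      intro hnil
      have := pyRange_len n
      rw [hnil] at this
      simp at this
      omega
    cases hco : ord with
    | nil => exact absurd ((PySem.List.sorted_eq_nil_iff E _ false).mp hco) hEne
    | cons o rest =>
    -- o.2 is the maximum M
    have homem : o ∈ E := hperm.subset (hco ▸ List.mem_cons_self)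
    obtain ⟨i0, hi0mem, hi0⟩ := List.mem_map.mp homem
    have ho2 : o.2 = colSum a n i0 := by rw [← hi0]
    have hle1 : o.2 ≤ M := by
      rw [hM, ho2]
      exact (PySem.List.le_foldl_max _ 0).2 _ (List.mem_map_of_mem hi0mem)
    have hle2 : M ≤ o.2 := by
      rcases PySem.List.foldl_max_mem ((PySem.List.pyRange 0 n).map (colSum a n)) 0 with h0 | hmem
      · rw [hM, h0, ho2]; exact colSum_nonneg a n i0
      · rw [← hM] at hmem
        obtain ⟨i1, hi1mem, hi1⟩ := List.mem_map.mp hmem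
        have hq : (i1, colSum a n i1) ∈ ord := hperm.mem_iff.mpr (List.mem_map_of_mem hi1mem)
        have hkey : toLex (-o.2, o.1) ≤ toLex (-(colSum a n i1), i1) := by
          have hp' := hpairs
          rw [hco, List.pairwise_cons] at hp'
          rw [hco] at hq
          rcases List.mem_cons.mp hq with heq | hq
          · rw [show colSum a n i1 = ((i1, colSum a n i1) : Int × Int).2 from rfl,
              show i1 = ((i1, colSum a n i1) : Int × Int).1 from rfl, ← heq]
          · exact hp'.1 _ hq
        rcases Prod.Lex.le_iff.mp hkey with h | h
        · simp only [ofLex_toLex] at h; omega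
        · simp only [ofLex_toLex] at h; omega
    have hM2 : o.2 = M := le_antisymm hle1 hle2
    -- the selected list equals A's
    have hfil : ord.filter (fun p => decide (p.2 = M)) = E.filter (fun p => decide (p.2 = M)) := by
      apply PySem.List.eq_of_perm_of_pairwise_le_of_injective
          (fun p : Int × Int => toLex (-p.2, p.1)) key_inj (hperm.filter _)
      · exact List.Pairwise.sublist List.filter_sublist hpairs
      · rw [List.pairwise_filter]
        rw [hE, List.pairwise_map]
        apply List.Pairwise.imp_of_mem (l := PySem.List.pyRange 0 n)
          (R := (· < ·)) ?_ (pairwise_lt_pyRange n)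
        intro i j _ _ hij h1 h2
        apply Prod.Lex.le_iff.mpr
        right
        simp only [ofLex_toLex]
        constructor
        · simp only [decide_eq_true_eq] at h1 h2
          omega
        · exact le_of_lt hij
    have hEfil : E.filter (fun p => decide (p.2 = M))
        = ((PySem.List.pyRange 0 n).filter (fun i => decide (colSum a n i = M))).map
            (fun i => (i, colSum a n i)) := by
      rw [hE, List.filter_map]
      rfl
    rw [hco] at hfil
    change _ = (((((o :: rest).filterMap (fun p => if p.2 = o.2 then some (p.1 + 1) else none)).length : Nat) : Int), o.2,
      (o :: rest).filterMap (fun p => if p.2 = o.2 then some (p.1 + 1) else none))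
    rw [filterMap_if_plus_one o.2, hM2, hfil, hEfil, List.map_map]
    have hfinal : ((PySem.List.pyRange 0 n).filter (fun i => decide (colSum a n i = M))).map
          ((fun p : Int × Int => p.1 + 1) ∘ fun i => (i, colSum a n i))
        = ((PySem.List.pyRange 0 n).filter (fun i => decide (colSum a n i = M))).map (· + 1) := rfl
    rw [hfinal]

-- ===== VERDICT (by name: the statement is the Claim_ definition above) =====
theorem check_spec : Claim_equal_check := by
  intro a n _ hpre
  unfold Spec_check
  exact check_eq_alt a n hpre
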